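-- pv_equiv track=rewrite | github.com/Dduhalde/TICS100 | 2025-1/Códigos/Ayudantía 11.py | concatenar_letras
-- ===== SOURCE A (Python) =====
-- def concatenar_letras(lista_palabras):
--     resultado = []
--     max_length = max(len(palabra) for palabra in lista_palabras)
--
--     for i in range(max_length):
--         for palabra in lista_palabras:
--             if i < len(palabra):
--                 resultado.append(palabra[i])
--
--     return ''.join(resultado)
-- ===== SOURCE B (Python) =====
-- def concatenar_letras(lista_palabras):
--     rest = [p for p in lista_palabras if p]
--     columnas = []
--     while rest:
--         columnas.append(''.join(p[0] for p in rest))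
--         rest = [p[1:] for p in rest if len(p) > 1]
--     return ''.join(columnas)
-- ===== Notes on version B (the rewrite author's own statement) =====
-- stated objective: alternative
-- what changed: B maintains no index or maximum length: it repeatedly peels the first character off every remaining non-empty word (appending one column per pass) until nothing is left, instead of A's indexed double loop up to max(len).
import Mathlib
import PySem

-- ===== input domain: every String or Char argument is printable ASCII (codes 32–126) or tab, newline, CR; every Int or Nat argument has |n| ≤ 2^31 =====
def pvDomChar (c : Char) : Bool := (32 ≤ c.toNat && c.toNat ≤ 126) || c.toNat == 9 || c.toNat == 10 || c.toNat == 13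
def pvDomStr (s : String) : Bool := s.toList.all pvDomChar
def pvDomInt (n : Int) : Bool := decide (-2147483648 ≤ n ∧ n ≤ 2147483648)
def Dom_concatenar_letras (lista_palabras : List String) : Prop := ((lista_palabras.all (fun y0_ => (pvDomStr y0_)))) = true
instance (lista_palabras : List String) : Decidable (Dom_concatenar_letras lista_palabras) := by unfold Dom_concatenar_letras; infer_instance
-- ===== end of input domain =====

-- B replaces A's indexed double loop up to max(len) by repeatedly peeling the first
-- character off every remaining non-empty word (one column per pass); alternative
-- decomposition, same cost; on [] A raises ValueError while B returns ''.


-- ===== PORT A =====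
-- 'max(len(palabra) for palabra in lista_palabras)': first length, then fold max;
-- on [] Python raises ValueError (excluded by Pre_), the port returns "".
-- 'palabra[i]' under the guard 'i < len(palabra)' is exact as toList.getD i ' '.
def concatenar_letras (lista_palabras : List String) : String :=
  match lista_palabras.map (fun palabra => palabra.toList.length) with
  | [] => ""  -- ValueError in Python: outside Pre_
  | l :: ls =>
    let max_length := ls.foldl Nat.max l
    let resultado := (List.range max_length).foldl (fun acc i =>
      lista_palabras.foldl (fun acc palabra =>
        if i < palabra.toList.length then acc ++ [palabra.toList.getD i ' '] else acc) acc)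
      ([] : List Char)
    String.mk resultado

-- ===== PORT B =====
-- termination helpers for the while loop (measure: sum of remaining lengths + count)
theorem pvPeel_measure (rest : List (List Char)) :
    ((((rest.filter (fun p => 1 < p.length)).map (fun p => p.drop 1)).map List.length).sum
      + ((rest.filter (fun p => 1 < p.length)).map (fun p => p.drop 1)).length)
      ≤ (rest.map List.length).sum := by
  induction rest with
  | nil => simp
  | cons a t ih =>
    simp only [List.length_map] at ih ⊢
    by_cases h : 1 < a.length
    · simp only [List.filter_cons, h, decide_true, if_pos, List.map_cons, List.sum_cons,
        List.length_cons, List.length_drop]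
      omega
    · simp only [List.filter_cons, h, decide_false, if_neg, List.map_cons, List.sum_cons,
        Bool.false_eq_true, not_false_eq_true]
      omega

theorem pv_attach_filter_map {a b : Type} [DecidableEq a] (l : List a) (p : a → Bool) (g : a → b) :
    ((l.attach.filter (fun x => p x.val)).map (fun x => g x.val)) = (l.filter p).map g := by
  rw [List.filter_attach, List.map_map]
  have : ((fun x => g x.val) ∘ (Subtype.map id (fun _ => List.mem_of_mem_filter)
      : {x // x ∈ l.filter p} → {x // x ∈ l})) = fun x => g x.val := by
    funext x; rfl
  rw [this]
  simp

-- the while loop of B: emit the column of first characters, keep tails of words of length > 1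
def pvPeel (rest : List (List Char)) : List Char :=
  if h : rest = [] then []
  else (rest.map (fun p => p.headD ' '))
    ++ pvPeel ((rest.filter (fun p => 1 < p.length)).map (fun p => p.drop 1))
termination_by (rest.map List.length).sum + rest.length
decreasing_by
  rw [pv_attach_filter_map rest (fun p => decide (1 < p.length)) (fun p => List.drop 1 p)]
  have h1 := pvPeel_measure rest
  have h2 : 0 < rest.length := List.length_pos_iff.mpr h
  simp only [List.length_map] at h1 ⊢
  omega

def concatenar_letras_alt (lista_palabras : List String) : String :=
  String.mk (pvPeel ((lista_palabras.map String.toList).filter (fun p => p ≠ [])))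

-- ===== PRECONDITION & SPEC =====
-- Pre_ excludes exactly the empty list, on which A's max() raises ValueError.
def Pre_concatenar_letras (lista_palabras : List String) : Prop := lista_palabras ≠ []
instance (lista_palabras : List String) : Decidable (Pre_concatenar_letras lista_palabras) := by
  unfold Pre_concatenar_letras; infer_instance
def pvWitness_concatenar_letras : List String := ["ab", "c"]

def Spec_concatenar_letras (lista_palabras : List String) (out : String) : Prop :=
  out = concatenar_letras_alt lista_palabras
instance (lista_palabras : List String) (out : String) : Decidable (Spec_concatenar_letras lista_palabras out) := by
  unfold Spec_concatenar_letras; infer_instance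

-- ===== CLAIM (what is proved, stated in full; the proofs are below) =====
def Claim_equal_concatenar_letras : Prop := ∀ (lista_palabras : List String),
  Dom_concatenar_letras lista_palabras → Pre_concatenar_letras lista_palabras →
  Spec_concatenar_letras lista_palabras (concatenar_letras lista_palabras)

-- ===== LEMMAS AND PROOFS =====

-- column i of a word list: the characters at index i of the words long enough
def pvCol (i : Nat) (ws : List (List Char)) : List Char :=
  ws.flatMap (fun w => if i < w.length then [w.getD i ' '] else [])

theorem pvCol_filter (i : Nat) (ws : List (List Char)) :
    pvCol i (ws.filter (fun p => p ≠ [])) = pvCol i ws := by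
  induction ws with
  | nil => rfl
  | cons w t ih =>
    by_cases h : w = []
    · subst h; simpa [pvCol] using ih
    · simp [pvCol, h] at ih ⊢; rw [ih]

theorem pvCol_shift (i : Nat) (ws : List (List Char)) :
    pvCol (i + 1) ws = pvCol i ((ws.filter (fun p => 1 < p.length)).map (fun p => p.drop 1)) := by
  induction ws with
  | nil => rfl
  | cons w t ih =>
    simp only [pvCol, List.filter_cons, List.flatMap_cons] at ih ⊢
    by_cases h : 1 < w.length
    · simp only [h, decide_true, if_pos, List.map_cons, List.flatMap_cons]
      rw [← ih]
      congr 1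
      by_cases hi : i + 1 < w.length
      · have hi' : i < (w.drop 1).length := by simp only [List.length_drop]; omega
        rw [if_pos hi, if_pos hi']
        rw [List.getD_eq_getElem?_getD, List.getD_eq_getElem?_getD, List.getElem?_drop,
          Nat.add_comm 1 i]
      · have hi' : ¬ i < (w.drop 1).length := by simp only [List.length_drop]; omega
        rw [if_neg hi, if_neg hi']
    · have hi : ¬ (i + 1 < w.length) := by omega
      simp only [h, decide_false, Bool.false_eq_true, if_neg, not_false_eq_true, if_neg hi,
        List.nil_append]
      exact ih

theorem pvCol_zero (ws : List (List Char)) (h : ∀ w ∈ ws, w ≠ []) :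
    pvCol 0 ws = ws.map (fun p => p.headD ' ') := by
  induction ws with
  | nil => rfl
  | cons w t ih =>
    have hw : w ≠ [] := h w (by simp)
    have hl : 0 < w.length := List.length_pos_iff.mpr hw
    simp only [pvCol, List.flatMap_cons, List.map_cons, if_pos hl]
    have hh : w.getD 0 ' ' = w.headD ' ' := by
      cases w with
      | nil => simp at hw
      | cons c cs => rfl
    rw [hh]
    have ih' := ih (fun v hv => h v (by simp [hv]))
    simp only [pvCol] at ih'
    rw [ih']
    rfl

-- B's loop computes the columns 0..n-1 for any bound n on all remaining word lengths
theorem pvPeel_eq (n : Nat) : ∀ (ws : List (List Char)),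
    (∀ w ∈ ws, w ≠ [] ∧ w.length ≤ n) →
    pvPeel ws = (List.range n).flatMap (fun i => pvCol i ws) := by
  induction n with
  | zero =>
    intro ws h
    cases ws with
    | nil => simp [pvPeel]
    | cons w t =>
      have := h w (by simp)
      have : w = [] := List.eq_nil_of_length_eq_zero (by omega)
      exact absurd this (h w (by simp)).1
  | succ n ih =>
    intro ws h
    by_cases hws : ws = []
    · subst hws; simp [pvPeel, pvCol]
    · rw [pvPeel]; simp only [hws, dite_false]
      have hnext : ∀ w ∈ (ws.filter (fun p => 1 < p.length)).map (fun p => p.drop 1),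
          w ≠ [] ∧ w.length ≤ n := by
        intro w hw
        simp only [List.mem_map, List.mem_filter] at hw
        obtain ⟨v, ⟨hv, hv1⟩, rfl⟩ := hw
        have hv1' : 1 < v.length := by simpa using hv1
        have hle := (h v hv).2
        constructor
        · intro hnil
          have := congrArg List.length hnil
          simp at this; omega
        · simp; omega
      rw [ih _ hnext]
      rw [List.range_succ_eq_map]
      simp only [List.flatMap_cons, List.flatMap_map]
      rw [pvCol_zero ws (fun w hw => (h w hw).1)]
      congr 1
      have hfun : (fun i => pvCol i ((ws.filter (fun p => 1 < p.length)).map (fun p => p.drop 1)))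
          = fun i => pvCol (i + 1) ws := funext fun i => (pvCol_shift i ws).symm
      rw [hfun]

theorem pv_le_foldl_max : ∀ (ls : List Nat) (l a : Nat), (a ≤ l ∨ a ∈ ls) → a ≤ ls.foldl Nat.max l := by
  intro ls
  induction ls with
  | nil => intro l a h; simpa using h
  | cons b t ih =>
    intro l a h
    simp only [List.foldl_cons]
    rcases h with h | h
    · exact ih _ _ (Or.inl (le_trans h (Nat.le_max_left l b)))
    · rcases List.mem_cons.mp h with rfl | h
      · exact ih _ _ (Or.inl (Nat.le_max_right l a))
      · exact ih _ _ (Or.inr h)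

theorem pv_filter_map_eq_col (i : Nat) (lista : List String) :
    ((lista.filter (fun p => decide (i < p.toList.length))).map (fun p => p.toList.getD i ' '))
      = pvCol i (lista.map String.toList) := by
  induction lista with
  | nil => rfl
  | cons p t ih =>
    simp only [pvCol, List.filter_cons, List.map_cons, List.flatMap_cons] at ih ⊢
    by_cases h : i < p.toList.length
    · simp only [h, decide_true, if_pos, List.map_cons]
      rw [List.cons_append, List.nil_append]
      rw [← ih]
    · simp only [h, decide_false, Bool.false_eq_true, if_neg, not_false_eq_true, List.nil_append]
      exact ih

-- ===== VERDICT (by name: the statement is the Claim_ definition above) =====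
theorem concatenar_letras_spec : Claim_equal_concatenar_letras := by
  intro lista hdom hpre
  unfold Spec_concatenar_letras concatenar_letras concatenar_letras_alt
  cases lista with
  | nil => exact absurd rfl hpre
  | cons p ps =>
    simp only [List.map_cons]
    set M := (ps.map (fun palabra => palabra.toList.length)).foldl Nat.max p.toList.length with hM
    -- A's nested loops as a flatMap of columns
    have hA : ((List.range M).foldl (fun acc i =>
        (p :: ps).foldl (fun acc palabra =>
          if i < palabra.toList.length then acc ++ [palabra.toList.getD i ' '] else acc) acc)
        ([] : List Char))
        = (List.range M).flatMap (fun i => pvCol i ((p :: ps).map String.toList)) := by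
      have hinner : ∀ (acc : List Char) (i : Nat),
          (p :: ps).foldl (fun acc palabra =>
            if i < palabra.toList.length then acc ++ [palabra.toList.getD i ' '] else acc) acc
          = acc ++ pvCol i ((p :: ps).map String.toList) := by
        intro acc i
        rw [PySem.List.foldl_append_ite (fun palabra : String => i < palabra.toList.length)
          (fun palabra : String => palabra.toList.getD i ' ') (p :: ps) acc]
        rw [pv_filter_map_eq_col]
      calc ((List.range M).foldl (fun acc i =>
            (p :: ps).foldl (fun acc palabra =>
              if i < palabra.toList.length then acc ++ [palabra.toList.getD i ' '] else acc) acc)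
            ([] : List Char))
          = ((List.range M).foldl (fun acc i =>
              acc ++ pvCol i ((p :: ps).map String.toList)) ([] : List Char)) := by
            exact PySem.List.foldl_congr_mem _ _ _ _ (fun acc i _ => hinner acc i)
        _ = (List.range M).flatMap (fun i => pvCol i ((p :: ps).map String.toList)) := by
            simpa using PySem.List.foldl_append_eq_flatMap
              (g := fun i => pvCol i ((p :: ps).map String.toList)) (l := List.range M) (acc := [])
    -- B's peeling loop as the same flatMap
    have hB : pvPeel (((p :: ps).map String.toList).filter (fun w => w ≠ []))
        = (List.range M).flatMap (fun i => pvCol i ((p :: ps).map String.toList)) := by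
      rw [pvPeel_eq M]
      · have : (fun i => pvCol i (((p :: ps).map String.toList).filter (fun w => w ≠ [])))
            = fun i => pvCol i ((p :: ps).map String.toList) :=
          funext fun i => pvCol_filter i _
        rw [this]
      · intro w hw
        have hw' : w ∈ (p :: ps).map String.toList := List.mem_of_mem_filter hw
        refine ⟨by simpa using (List.mem_filter.mp hw).2, ?_⟩
        obtain ⟨q, hq, rfl⟩ := List.mem_map.mp hw'
        rcases List.mem_cons.mp hq with rfl | hq
        · exact pv_le_foldl_max _ _ _ (Or.inl le_rfl)
        · exact pv_le_foldl_max _ _ _ (Or.inr (List.mem_map.mpr ⟨q, hq, rfl⟩))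
    simp only [List.map_cons] at hA hB
    rw [hA, hB]
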